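-- pv_equiv track=rewrite | github.com/qonenmr/spinspj | nus_deeplearning/nus/fileiobase.py | trace2index_reg
-- ===== SOURCE A (Python) =====
-- def trace2index_flat(shape, ntrace):
--
--     """
--
--     Calculate the index of a trace assuming a flat structure
--
--     """
--
--     # algorithm is to take quotient/remainers of sizes in reverse
--
--     q = ntrace  # seed quotient with remained
--
--     index = []
--
--     for s in shape[:0:-1]:  # loop from last size to 2nd size
--
--         q, r = divmod(q, s)
--
--         index.insert(0, r)
--
--     index.insert(0, q)
--
--     return tuple(index)
--
-- def trace2index_reg(shape, ntrace):
--
--     """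
--
--     Calculate the index of a trace assuming the same phase/time increment
--
--     ordering
--
--     """
--
--     n = len(shape)
--
--     q, r = divmod(ntrace, 2 ** n)
--
--     to_add = list(trace2index_flat([2] * n, r))
--
--     pshape = [i // 2 for i in shape]
--
--     base = list(trace2index_flat(pshape, q))
--
--     total = [b * 2 + a for b, a in zip(base, to_add)]
--
--     return tuple(total)
-- ===== SOURCE B (Python) =====
-- def trace2index_reg(shape, ntrace):
--     # single fused pass: decompose the quotient (halved sizes) and the bits together
--     q, r = divmod(ntrace, 2 ** len(shape))
--     digits = []
--     for s in shape[:0:-1]: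
--         q, br = divmod(q, s // 2)
--         r, bit = divmod(r, 2)
--         digits.append(br * 2 + bit)
--     digits.append(q * 2 + r)
--     digits.reverse()
--     return tuple(digits)
-- ===== Notes on version B (the rewrite author's own statement) =====
-- stated objective: faster
-- what changed: Replaces A's three passes (two flat decompositions built with quadratic index.insert(0, r) plus a zip) with one fused loop over shape[:0:-1] that threads both quotients, appends each combined digit, and reverses once at the end.
import Mathlib
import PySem

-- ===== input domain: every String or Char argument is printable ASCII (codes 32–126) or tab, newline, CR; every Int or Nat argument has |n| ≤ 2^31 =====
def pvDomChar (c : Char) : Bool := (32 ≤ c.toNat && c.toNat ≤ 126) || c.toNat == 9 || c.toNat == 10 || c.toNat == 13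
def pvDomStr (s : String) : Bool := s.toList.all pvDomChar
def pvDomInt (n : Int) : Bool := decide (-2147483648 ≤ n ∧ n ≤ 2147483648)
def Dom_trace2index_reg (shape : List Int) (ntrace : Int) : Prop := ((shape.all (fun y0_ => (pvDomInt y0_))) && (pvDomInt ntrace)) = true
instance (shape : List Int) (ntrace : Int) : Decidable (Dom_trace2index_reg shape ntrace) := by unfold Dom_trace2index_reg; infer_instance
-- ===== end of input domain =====

-- B fuses A's three passes (two flat decompositions with quadratic insert(0) plus a zip) into one linear loop.

-- ===== PORT A =====
-- trace2index_flat: fold over shape[:0:-1] (= shape.tail.reverse for step -1, stop 0),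
-- state (q, index); Python's index.insert(0, r) is consing r.
def trace2index_flat (shape : List Int) (ntrace : Int) : List Int :=
  let st := (shape.tail.reverse).foldl
    (fun (p : Int × List Int) s => (PySem.Int.floordiv p.1 s, PySem.Int.mod p.1 s :: p.2))
    (ntrace, [])
  st.1 :: st.2

def trace2index_reg (shape : List Int) (ntrace : Int) : List Int :=
  let n := shape.length
  let q := PySem.Int.floordiv ntrace (2 ^ n)
  let r := PySem.Int.mod ntrace (2 ^ n)
  let to_add := trace2index_flat (List.replicate n 2) r
  let pshape := shape.map (fun i => PySem.Int.floordiv i 2)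
  let base := trace2index_flat pshape q
  List.zipWith (fun b a => b * 2 + a) base to_add

-- ===== PORT B =====
-- single loop over shape[:0:-1] (= shape.tail.reverse); digits.append d is digits ++ [d],
-- digits.reverse() at the end is List.reverse.
def trace2index_reg_alt (shape : List Int) (ntrace : Int) : List Int :=
  let q := PySem.Int.floordiv ntrace (2 ^ shape.length)
  let r := PySem.Int.mod ntrace (2 ^ shape.length)
  let st := (shape.tail.reverse).foldl
    (fun (p : Int × Int × List Int) s =>
      (PySem.Int.floordiv p.1 (PySem.Int.floordiv s 2),
       PySem.Int.floordiv p.2.1 2,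
       p.2.2 ++ [PySem.Int.mod p.1 (PySem.Int.floordiv s 2) * 2 + PySem.Int.mod p.2.1 2]))
    (q, r, [])
  (st.2.2 ++ [st.1 * 2 + st.2.1]).reverse

-- ===== PRECONDITION & SPEC =====
-- Pre_ excludes exactly the inputs where Python A raises ZeroDivisionError:
-- some element s of shape[1:] with s // 2 == 0 (i.e. 0 ≤ s ≤ 1) is used as a divisor.
def Pre_trace2index_reg (shape : List Int) (ntrace : Int) : Prop :=
  ∀ s ∈ shape.tail, ¬ (0 ≤ s ∧ s ≤ 1)
instance (shape : List Int) (ntrace : Int) : Decidable (Pre_trace2index_reg shape ntrace) := by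
  unfold Pre_trace2index_reg; infer_instance

def pvWitness_trace2index_reg : List Int × Int := ([4, 3], 5)

def Spec_trace2index_reg (shape : List Int) (ntrace : Int) (out : List Int) : Prop :=
  out = trace2index_reg_alt shape ntrace
instance (shape : List Int) (ntrace : Int) (out : List Int) : Decidable (Spec_trace2index_reg shape ntrace out) := by
  unfold Spec_trace2index_reg; infer_instance

-- ===== CLAIM (what is proved, stated in full; the proofs are below) =====
def Claim_equal_trace2index_reg : Prop := ∀ (shape : List Int) (ntrace : Int), Dom_trace2index_reg shape ntrace → Pre_trace2index_reg shape ntrace → Spec_trace2index_reg shape ntrace (trace2index_reg shape ntrace)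

-- ===== LEMMAS AND PROOFS =====

-- core of trace2index_flat's loop
def flatStep (p : Int × List Int) (s : Int) : Int × List Int :=
  (PySem.Int.floordiv p.1 s, PySem.Int.mod p.1 s :: p.2)

-- recursive reference form of B's fused loop (digits in final order, built by cons)
def t2iRec (ss : List Int) (q r : Int) : Int × Int × List Int :=
  match ss with
  | [] => (q, r, [])
  | s :: t =>
    let p := t2iRec t q r
    (PySem.Int.floordiv p.1 (PySem.Int.floordiv s 2),
     PySem.Int.floordiv p.2.1 2,
     (PySem.Int.mod p.1 (PySem.Int.floordiv s 2) * 2 + PySem.Int.mod p.2.1 2) :: p.2.2)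

-- B's fold over t.reverse equals the reference recursion (with its digits reversed)
theorem fused_eq_rec (t : List Int) (q r : Int) :
    t.reverse.foldl
      (fun (p : Int × Int × List Int) s =>
        (PySem.Int.floordiv p.1 (PySem.Int.floordiv s 2),
         PySem.Int.floordiv p.2.1 2,
         p.2.2 ++ [PySem.Int.mod p.1 (PySem.Int.floordiv s 2) * 2 + PySem.Int.mod p.2.1 2]))
      (q, r, []) =
      ((t2iRec t q r).1, (t2iRec t q r).2.1, (t2iRec t q r).2.2.reverse) := by
  induction t with
  | nil => rfl
  | cons s t ih =>
    simp only [List.reverse_cons, List.foldl_append, ih, List.foldl_cons, List.foldl_nil,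
      t2iRec, List.reverse_cons]

-- the reference recursion equals A's two folds combined by zipWith
theorem t2iRec_eq_folds (t : List Int) (q r : Int) :
    t2iRec t q r =
      ( ((t.map (fun i => PySem.Int.floordiv i 2)).reverse.foldl flatStep (q, [])).1,
        ((List.replicate t.length 2).foldl flatStep (r, [])).1,
        List.zipWith (fun b a => b * 2 + a)
          ((t.map (fun i => PySem.Int.floordiv i 2)).reverse.foldl flatStep (q, [])).2
          ((List.replicate t.length 2).foldl flatStep (r, [])).2 ) := by
  induction t with
  | nil => rfl
  | cons s t ih =>
    simp only [t2iRec, ih, List.map_cons, List.reverse_cons, List.foldl_append,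
      List.length_cons, List.replicate_succ', List.foldl_cons]
    rfl

theorem trace2index_reg_spec : Claim_equal_trace2index_reg := by
  intro shape ntrace _ _
  unfold Spec_trace2index_reg
  cases shape with
  | nil => rfl
  | cons s0 t =>
    show trace2index_reg (s0 :: t) ntrace = trace2index_reg_alt (s0 :: t) ntrace
    have hB : trace2index_reg_alt (s0 :: t) ntrace =
        ((t2iRec t (PySem.Int.floordiv ntrace (2 ^ (t.length + 1)))
                   (PySem.Int.mod ntrace (2 ^ (t.length + 1)))).1 * 2 +
         (t2iRec t (PySem.Int.floordiv ntrace (2 ^ (t.length + 1)))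
                   (PySem.Int.mod ntrace (2 ^ (t.length + 1)))).2.1) ::
        (t2iRec t (PySem.Int.floordiv ntrace (2 ^ (t.length + 1)))
                  (PySem.Int.mod ntrace (2 ^ (t.length + 1)))).2.2 := by
      simp only [trace2index_reg_alt, List.tail_cons, List.length_cons]
      rw [fused_eq_rec]
      simp only [List.reverse_append, List.reverse_reverse, List.reverse_singleton,
        List.singleton_append]
    rw [hB, t2iRec_eq_folds]
    simp only [trace2index_reg, trace2index_flat, List.tail_cons, List.map_cons,
      List.length_cons, List.replicate_succ, List.reverse_replicate, List.zipWith_cons_cons]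
    rfl
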